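-- pv_equiv track=rewrite | github.com/arxlang/arx | src/arx/testing.py | _decode_assert_failure_field
-- ===== SOURCE A (Python) =====
-- def _decode_assert_failure_field(text: str) -> str:
--     """
--     title: Decode one escaped assertion failure protocol field.
--     parameters:
--       text:
--         type: str
--     returns:
--       type: str
--     """
--     decoded: list[str] = []
--     index = 0
--     escapes = {
--         "\\": "\\",
--         "n": "\n",
--         "p": "|",
--         "r": "\r",
--         "t": "\t",
--     }
--
--     while index < len(text):
--         char = text[index]
--         if char != "\\":
--             decoded.append(char)
--             index += 1
--             continue
--
--         if index + 1 >= len(text):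
--             decoded.append("\\")
--             break
--
--         escaped = text[index + 1]
--         replacement = escapes.get(escaped)
--         if replacement is None:
--             decoded.append("\\")
--             decoded.append(escaped)
--         else:
--             decoded.append(replacement)
--         index += 2
--
--     return "".join(decoded)
-- ===== SOURCE B (Python) =====
-- def _decode_assert_failure_field(text: str) -> str:
--     """Decode one escaped assertion failure protocol field.
--
--     Instead of stepping one character at a time, jump with str.find to each
--     backslash and copy the unescaped run before it in one slice.
--     """
--     escapes = {
--         "\\": "\\",
--         "n": "\n",
--         "p": "|",
--         "r": "\r",
--         "t": "\t",
--     }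
--     out: list[str] = []
--     rest = text
--     while True:
--         i = rest.find("\\")
--         if i == -1:
--             out.append(rest)
--             break
--         out.append(rest[:i])
--         if i + 1 == len(rest):
--             out.append("\\")
--             break
--         e = rest[i + 1]
--         out.append(escapes.get(e, "\\" + e))
--         rest = rest[i + 2:]
--     return "".join(out)
-- ===== Notes on version B (the rewrite author's own statement) =====
-- stated objective: faster
-- what changed: Replaced the per-character index-stepping while loop with find-driven jumps: each iteration locates the next backslash with C-level str.find and copies the whole unescaped run before it as one slice, instead of appending characters one by one.
import Mathlib
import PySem

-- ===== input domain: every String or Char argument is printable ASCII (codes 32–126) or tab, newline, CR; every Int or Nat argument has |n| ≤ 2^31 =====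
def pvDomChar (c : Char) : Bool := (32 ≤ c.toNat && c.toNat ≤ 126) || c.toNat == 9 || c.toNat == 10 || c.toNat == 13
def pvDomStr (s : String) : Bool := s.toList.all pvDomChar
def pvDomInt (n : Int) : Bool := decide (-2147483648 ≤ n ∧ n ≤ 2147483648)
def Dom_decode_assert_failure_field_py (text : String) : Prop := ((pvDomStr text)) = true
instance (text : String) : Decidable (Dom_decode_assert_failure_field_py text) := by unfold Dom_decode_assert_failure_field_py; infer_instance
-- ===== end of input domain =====

-- B replaces A's per-character index loop by find-driven jumps: str.find locates each
-- backslash and the unescaped run before it is copied in one slice (objective: faster, constant-factor; measured).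


-- the escapes dict literal, shared verbatim by both Pythons
def pvEscapes : PySem.Dict Char Char :=
  PySem.Dict.ofList [('\\', '\\'), ('n', '\n'), ('p', '|'), ('r', '\r'), ('t', '\t')]

-- ===== PORT A =====
-- the while loop over `index` with accumulator `decoded`, step for step
def decodeAAux (text : List Char) (index : Nat) (decoded : List Char) : List Char :=
  if h : index < text.length then
    let char := text[index]
    if char ≠ '\\' then
      decodeAAux text (index + 1) (decoded ++ [char])
    else if text.length ≤ index + 1 then
      decoded ++ ['\\']
    else
      let escaped := text[index + 1]!
      match PySem.Dict.get? pvEscapes escaped with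
      | none => decodeAAux text (index + 2) (decoded ++ ['\\', escaped])
      | some replacement => decodeAAux text (index + 2) (decoded ++ [replacement])
  else decoded
termination_by text.length - index

def decode_assert_failure_field_py (text : String) : String :=
  String.ofList (decodeAAux text.toList 0 [])

-- ===== PORT B =====
-- Source B's loop: rest.find('\\') → List.findIdx? (none = Python's -1); the in-range,
-- nonnegative slices rest[:i] / rest[i+2:] are exactly take / drop.
def decodeBAux (rest : List Char) (out : List Char) : List Char :=
  match h : rest.findIdx? (· == '\\') with
  | none => out ++ rest
  | some i =>
    if h2 : i + 1 = rest.length then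
      out ++ rest.take i ++ ['\\']
    else
      let e := rest[i + 1]!
      decodeBAux (rest.drop (i + 2))
        (out ++ rest.take i ++
          (match PySem.Dict.get? pvEscapes e with
           | some r => [r]
           | none => ['\\', e]))
termination_by rest.length
decreasing_by
  have hi : i < rest.length := (List.findIdx?_eq_some_iff_findIdx_eq.mp h).1
  simp only [List.length_drop]
  omega

def decode_assert_failure_field_py_alt (text : String) : String :=
  String.ofList (decodeBAux text.toList [])

-- ===== PRECONDITION & SPEC =====
def Spec_decode_assert_failure_field_py (text : String) (out : String) : Prop := out = decode_assert_failure_field_py_alt text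
instance (text : String) (out : String) : Decidable (Spec_decode_assert_failure_field_py text out) := by unfold Spec_decode_assert_failure_field_py; infer_instance

-- ===== CLAIM (what is proved, stated in full; the proofs are below) =====
def Claim_equal_decode_assert_failure_field_py : Prop := ∀ (text : String), Dom_decode_assert_failure_field_py text → Spec_decode_assert_failure_field_py text (decode_assert_failure_field_py text)

-- ===== LEMMAS AND PROOFS =====

-- common reference function both ports are reduced to
def decodeSpec : List Char → List Char
  | [] => []
  | c :: rest =>
    if c = '\\' then
      match rest with
      | [] => ['\\']
      | e :: r =>
        (match PySem.Dict.get? pvEscapes e with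
         | some rp => [rp]
         | none => ['\\', e]) ++ decodeSpec r
    else c :: decodeSpec rest

lemma decodeAAux_eq (text : List Char) (index : Nat) (decoded : List Char) :
    decodeAAux text index decoded = decoded ++ decodeSpec (text.drop index) := by
  induction index, decoded using decodeAAux.induct text with
  | case1 index decoded h char hne ih =>
    rw [decodeAAux]
    dsimp only
    rw [dif_pos h, if_pos hne, ih]
    conv_rhs => rw [List.drop_eq_getElem_cons h, decodeSpec.eq_def]
    dsimp only
    rw [if_neg (by simpa using hne)]
    simp
    rfl
  | case2 index decoded h char hne h2 =>
    rw [decodeAAux]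
    dsimp only
    rw [dif_pos h, if_neg hne, if_pos h2]
    have hc : text[index] = '\\' := by simpa using hne
    have hend : text.drop index = ['\\'] := by
      have hx : text.drop index = text[index] :: text.drop (index + 1) := List.drop_eq_getElem_cons h
      rw [hx, hc, List.drop_eq_nil_of_le h2]
    rw [hend]
    simp [decodeSpec]
  | case3 index decoded h char hne h2 escaped hget ih =>
    rw [decodeAAux]
    dsimp only
    have hc : text[index] = '\\' := by simpa using hne
    have hlt : index + 1 < text.length := by omega
    have he : text[index + 1]! = text[index + 1] := getElem!_pos text (index + 1) hlt
    have hd : text.drop index = '\\' :: text[index + 1] :: text.drop (index + 2) := by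
      rw [List.drop_eq_getElem_cons h, hc, List.drop_eq_getElem_cons hlt]
    have hget' : pvEscapes.get? text[index + 1] = none := by rw [← he]; exact hget
    have ih' : decodeAAux text (index + 2) (decoded ++ ['\\', text[index + 1]]) =
        decoded ++ ['\\', text[index + 1]] ++ decodeSpec (List.drop (index + 2) text) := by
      rw [← he]; exact ih
    rw [dif_pos h, if_neg hne, if_neg h2, he, hget']
    dsimp only
    rw [ih']
    conv_rhs => rw [hd, decodeSpec.eq_def]
    dsimp only
    rw [if_pos rfl, hget']
    simp
  | case4 index decoded h char hne h2 escaped replacement hget ih =>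
    rw [decodeAAux]
    dsimp only
    have hc : text[index] = '\\' := by simpa using hne
    have hlt : index + 1 < text.length := by omega
    have he : text[index + 1]! = text[index + 1] := getElem!_pos text (index + 1) hlt
    have hd : text.drop index = '\\' :: text[index + 1] :: text.drop (index + 2) := by
      rw [List.drop_eq_getElem_cons h, hc, List.drop_eq_getElem_cons hlt]
    have hget' : pvEscapes.get? text[index + 1] = some replacement := by rw [← he]; exact hget
    have ih' : decodeAAux text (index + 2) (decoded ++ [replacement]) =
        decoded ++ [replacement] ++ decodeSpec (List.drop (index + 2) text) := ih
    rw [dif_pos h, if_neg hne, if_neg h2, he, hget']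
    dsimp only
    rw [ih']
    conv_rhs => rw [hd, decodeSpec.eq_def]
    dsimp only
    rw [if_pos rfl, hget']
    simp
  | case5 index decoded h =>
    rw [decodeAAux]
    dsimp only
    rw [dif_neg h, List.drop_eq_nil_of_le (by omega)]
    simp [decodeSpec]

lemma decodeSpec_of_no_backslash (xs : List Char) (hx : ∀ c ∈ xs, c ≠ '\\') :
    decodeSpec xs = xs := by
  induction xs with
  | nil => rfl
  | cons c rest ih =>
    rw [decodeSpec.eq_def]
    simp only []
    rw [if_neg (hx c (List.mem_cons_self))]
    rw [ih (fun d hd => hx d (List.mem_cons_of_mem c hd))]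

lemma decodeSpec_append_free (pre s : List Char) (hp : ∀ c ∈ pre, c ≠ '\\') :
    decodeSpec (pre ++ s) = pre ++ decodeSpec s := by
  induction pre with
  | nil => simp
  | cons c rest ih =>
    rw [List.cons_append, decodeSpec.eq_def]
    simp only []
    rw [if_neg (hp c (List.mem_cons_self))]
    rw [ih (fun d hd => hp d (List.mem_cons_of_mem c hd))]
    simp

lemma decodeBAux_eq (rest out : List Char) :
    decodeBAux rest out = out ++ decodeSpec rest := by
  induction rest, out using decodeBAux.induct with
  | case1 rest out h =>
    rw [decodeBAux]
    split
    · rw [decodeSpec_of_no_backslash rest]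
      intro c hc
      have hf := List.findIdx?_eq_none_iff.mp h c hc
      simpa using hf
    · rename_i i heq
      rw [h] at heq
      cases heq
  | case2 rest out i h h2 =>
    rw [decodeBAux]
    split
    · rename_i heq
      rw [h] at heq
      cases heq
    · rename_i i' heq
      rw [h] at heq
      injection heq with heqi
      subst heqi
      rw [dif_pos h2]
      obtain ⟨hi, hpi, hlt⟩ := List.findIdx?_eq_some_iff_getElem.mp h
      have hsplit : rest = rest.take i ++ '\\' :: rest.drop (i + 1) := by
        conv_lhs => rw [← List.take_append_drop i rest]
        rw [List.drop_eq_getElem_cons hi]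
        simp only [beq_iff_eq] at hpi
        rw [hpi]
      have hfree : ∀ c ∈ rest.take i, c ≠ '\\' := by
        intro c hc
        obtain ⟨j, hj, hjc⟩ := List.getElem_of_mem hc
        have hjlen : j < i := by
          have hj' := hj; simp only [List.length_take] at hj'; omega
        have hnp := hlt j hjlen
        rw [List.getElem_take] at hjc
        simpa [hjc] using hnp
      have hnil : rest.drop (i + 1) = [] := List.drop_eq_nil_of_le (by omega)
      conv_rhs => rw [hsplit]
      rw [decodeSpec_append_free _ _ hfree, hnil, decodeSpec]
      simp
  | case3 rest out i h h2 e ih =>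
    rw [decodeBAux]
    split
    · rename_i heq
      rw [h] at heq
      cases heq
    · rename_i i' heq
      rw [h] at heq
      injection heq with heqi
      subst heqi
      rw [dif_neg h2]
      obtain ⟨hi, hpi, hlt⟩ := List.findIdx?_eq_some_iff_getElem.mp h
      have hi1 : i + 1 < rest.length := by omega
      have he : rest[i + 1]! = rest[i + 1] := getElem!_pos rest (i + 1) hi1
      have hsplit : rest = rest.take i ++ '\\' :: rest[i + 1] :: rest.drop (i + 2) := by
        conv_lhs => rw [← List.take_append_drop i rest]
        rw [List.drop_eq_getElem_cons hi]
        simp only [beq_iff_eq] at hpi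
        rw [hpi, List.drop_eq_getElem_cons hi1]
      have hfree : ∀ c ∈ rest.take i, c ≠ '\\' := by
        intro c hc
        obtain ⟨j, hj, hjc⟩ := List.getElem_of_mem hc
        have hjlen : j < i := by
          have hj' := hj; simp only [List.length_take] at hj'; omega
        have hnp := hlt j hjlen
        rw [List.getElem_take] at hjc
        simpa [hjc] using hnp
      rw [ih, show e = rest[i + 1] from he]
      conv_rhs => rw [hsplit, decodeSpec_append_free _ _ hfree, decodeSpec.eq_def]
      dsimp only
      rw [if_pos rfl]
      simp

-- ===== VERDICT (by name: the statement is the Claim_ definition above) =====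
theorem decode_assert_failure_field_py_spec : Claim_equal_decode_assert_failure_field_py := by
  intro text _
  unfold Spec_decode_assert_failure_field_py
  unfold decode_assert_failure_field_py decode_assert_failure_field_py_alt
  rw [decodeAAux_eq, decodeBAux_eq]
  simp
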